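-- pv_equiv track=rewrite | github.com/martianxiu/ALS_pretraining | pcdet/models/backbones_3d/bev_mae_res.py | get_last_dims
-- ===== SOURCE A (Python) =====
-- def get_last_dims(grid_size):
--     kernel_list = [
--         (3,3,3),
--         (3,3,3),
--         (3,3,3),
--         (3,1,1)
--     ]
--     padding_list = [
--         (1,1,1),
--         (1,1,1),
--         (1,1,1),
--         (0,0,0)
--     ]
--     stride_list = [
--         (2,2,2),
--         (2,2,2),
--         (2,2,2),
--         (2,1,1)
--     ]
--     def calculate_output_size(input_size, kernel_size, padding, stride):
--         if isinstance(padding, tuple) and isinstance(stride, tuple) and isinstance(kernel_size, tuple):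
--             return tuple((input_size[i] + 2 * padding[i] - kernel_size[i]) // stride[i] + 1 for i in range(3))
--         else:
--             raise ValueError("Padding, stride, and kernel size must be tuples of length 3.")
--     D, H, W = grid_size
--     n_conv = len(kernel_list)
--     for i in range(n_conv):
--         D, H, W = calculate_output_size((D, H, W), kernel_list[i], padding_list[i], stride_list[i])
--     return D, H, W
-- ===== SOURCE B (Python) =====
-- def get_last_dims(grid_size):
--     # Closed form: three stride-2/kernel-3/pad-1 convs each compute ceil(x/2),
--     # so three give (x+7)//8; the last layer keeps H,W and maps D via (d-3)//2+1.
--     D, H, W = grid_size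
--     return ((D + 7) // 8 - 3) // 2 + 1, (H + 7) // 8, (W + 7) // 8
-- ===== Notes on version B (the rewrite author's own statement) =====
-- stated objective: simpler
-- what changed: B replaces A's per-layer loop with helper and kernel/padding/stride tables by a direct closed-form tuple: three stride-2 pad-1 kernel-3 layers compute (x+7)//8 and the last layer maps D via (d-3)//2+1, leaving H and W unchanged.
import Mathlib
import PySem

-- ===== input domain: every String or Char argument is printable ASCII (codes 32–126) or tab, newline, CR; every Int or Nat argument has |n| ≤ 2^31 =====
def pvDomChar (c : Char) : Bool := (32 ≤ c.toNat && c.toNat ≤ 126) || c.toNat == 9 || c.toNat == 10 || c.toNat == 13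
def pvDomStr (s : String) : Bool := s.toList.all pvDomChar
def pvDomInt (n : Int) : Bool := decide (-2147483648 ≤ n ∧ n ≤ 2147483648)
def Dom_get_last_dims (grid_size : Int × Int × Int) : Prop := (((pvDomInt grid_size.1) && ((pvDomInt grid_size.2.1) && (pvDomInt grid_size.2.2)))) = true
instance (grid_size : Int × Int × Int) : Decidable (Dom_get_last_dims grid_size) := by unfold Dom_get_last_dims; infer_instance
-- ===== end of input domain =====

-- B replaces A's per-layer loop and helper with a closed-form formula for the four fixed conv layers (simpler).


-- ===== PORT A =====
-- helper: calculate_output_size for the tuple branch (the isinstance guard is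
-- always true since all entries are tuples; the raise branch is unreachable).
def pvCalcOutputSize (inp k p s : Int × Int × Int) : Int × Int × Int :=
  (PySem.Int.floordiv (inp.1 + 2 * p.1 - k.1) s.1 + 1,
   PySem.Int.floordiv (inp.2.1 + 2 * p.2.1 - k.2.1) s.2.1 + 1,
   PySem.Int.floordiv (inp.2.2 + 2 * p.2.2 - k.2.2) s.2.2 + 1)

def get_last_dims (grid_size : Int × Int × Int) : Int × Int × Int :=
  let kernel_list : List (Int × Int × Int) := [(3,3,3),(3,3,3),(3,3,3),(3,1,1)]
  let padding_list : List (Int × Int × Int) := [(1,1,1),(1,1,1),(1,1,1),(0,0,0)]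
  let stride_list : List (Int × Int × Int) := [(2,2,2),(2,2,2),(2,2,2),(2,1,1)]
  let n_conv := kernel_list.length
  (List.range n_conv).foldl (fun dhw i =>
    pvCalcOutputSize dhw (kernel_list.getD i (0,0,0)) (padding_list.getD i (0,0,0))
      (stride_list.getD i (0,0,0))) grid_size

-- ===== PORT B =====
def get_last_dims_alt (grid_size : Int × Int × Int) : Int × Int × Int :=
  let D := grid_size.1; let H := grid_size.2.1; let W := grid_size.2.2
  (PySem.Int.floordiv (PySem.Int.floordiv (D + 7) 8 - 3) 2 + 1,
   PySem.Int.floordiv (H + 7) 8,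
   PySem.Int.floordiv (W + 7) 8)

-- ===== PRECONDITION & SPEC =====
def Spec_get_last_dims (grid_size : Int × Int × Int) (out : Int × Int × Int) : Prop := out = get_last_dims_alt grid_size
instance (grid_size : Int × Int × Int) (out : Int × Int × Int) : Decidable (Spec_get_last_dims grid_size out) := by unfold Spec_get_last_dims; infer_instance

-- ===== CLAIM (what is proved, stated in full; the proofs are below) =====
def Claim_equal_get_last_dims : Prop := ∀ (grid_size : Int × Int × Int), Dom_get_last_dims grid_size → Spec_get_last_dims grid_size (get_last_dims grid_size)

-- ===== LEMMAS AND PROOFS =====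

-- ===== VERDICT (by name: the statement is the Claim_ definition above) =====
theorem get_last_dims_spec : Claim_equal_get_last_dims := by
  intro ⟨D, H, W⟩ _
  unfold Spec_get_last_dims get_last_dims get_last_dims_alt pvCalcOutputSize
  simp only [List.length_cons, List.length_nil]
  rw [show List.range 4 = [0,1,2,3] from by decide]
  simp only [List.foldl, List.getD, List.getElem?_cons_zero, List.getElem?_cons_succ,
    Option.getD_some]
  rw [PySem.Int.floordiv_eq_ediv_of_pos (a := D + 2*1 - 3) (by norm_num),
      PySem.Int.floordiv_eq_ediv_of_pos (a := H + 2*1 - 3) (by norm_num),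
      PySem.Int.floordiv_eq_ediv_of_pos (a := W + 2*1 - 3) (by norm_num)]
  simp only [PySem.Int.floordiv_eq_ediv_of_pos (b := 2) (by norm_num),
    PySem.Int.floordiv_eq_ediv_of_pos (b := 1) (by norm_num),
    PySem.Int.floordiv_eq_ediv_of_pos (b := 8) (by norm_num)]
  refine Prod.ext ?_ (Prod.ext ?_ ?_) <;> simp <;> omega
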